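-- pv_equiv track=rewrite | github.com/fuegoservicios-lab/MealfitRD-Backend | db_inventory.py | _infer_shelf_life_days
-- ===== SOURCE A (Python) =====
-- def _infer_shelf_life_days(name: str, category: str) -> int:
--     """[P0-2] Default shelf_life por categoría cuando master_ingredients no lo tiene.
--     Antes era 14d para TODO, lo cual marcaba arroz/pasta/legumbres secas como URGENTE
--     a los 11 días y disparaba la REGLA DE SALVATAJE PROACTIVO incorrectamente.
--     """
--     name_lower = (name or "").lower()
--     cat_lower = (category or "").lower()
--
--     DRY_GOODS_KEYWORDS = (
--         'arroz', 'pasta', 'fideo', 'espagueti', 'macarrón', 'macarron',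
--         'lenteja', 'habichuela', 'frijol', 'garbanzo', 'gandul', 'moro',
--         'avena', 'quinoa', 'cuscús', 'cuscus', 'bulgur', 'cebada',
--         'harina', 'azúcar', 'azucar', 'sal', 'bicarbonato', 'levadura',
--         'cacao', 'café', 'cafe', 'té', 'infusión', 'especia', 'condimento',
--         'maíz seco', 'maiz seco', 'palomita', 'cereal'
--     )
--     if any(k in name_lower for k in DRY_GOODS_KEYWORDS):
--         return 180
--
--     if 'congelado' in name_lower or 'congelad' in cat_lower or 'frozen' in cat_lower:
--         return 60
--
--     # Categorías frescas
--     if 'hoja' in cat_lower or 'lechuga' in name_lower or 'espinaca' in name_lower or 'cilantro' in name_lower: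
--         return 5
--     if 'proteína' in cat_lower or 'proteina' in cat_lower or 'carne' in cat_lower or 'pollo' in cat_lower or 'pescado' in cat_lower or 'mariscos' in cat_lower:
--         return 5
--     if 'fruta' in cat_lower:
--         return 7
--     if 'lácteo' in cat_lower or 'lacteo' in cat_lower or 'leche' in cat_lower or 'queso' in cat_lower or 'yogurt' in cat_lower:
--         return 14
--     if 'tubérculo' in cat_lower or 'tuberculo' in cat_lower or 'papa' in name_lower or 'batata' in name_lower or 'yuca' in name_lower or 'ñame' in name_lower:
--         return 21
--     if 'vegetal' in cat_lower or 'verdura' in cat_lower: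
--         return 10
--     if 'huevo' in name_lower:
--         return 21
--     if 'enlatado' in name_lower or 'enlatad' in cat_lower or 'lata' in cat_lower:
--         return 365
--
--     return 14
-- ===== SOURCE B (Python) =====
-- # One flat keyword table; scan ALL of it collecting matches, then pick the
-- # highest-priority (lowest-index) match instead of an early-return rule cascade.
-- # Correct because every keyword of one original rule carries that rule's days,
-- # earlier rules get strictly smaller indices, and min over (index, days) pairs
-- # therefore returns exactly the first rule A's if-chain would have taken.
-- _DRY = ('arroz', 'pasta', 'fideo', 'espagueti', 'macarrón', 'macarron',
--         'lenteja', 'habichuela', 'frijol', 'garbanzo', 'gandul', 'moro',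
--         'avena', 'quinoa', 'cuscús', 'cuscus', 'bulgur', 'cebada',
--         'harina', 'azúcar', 'azucar', 'sal', 'bicarbonato', 'levadura',
--         'cacao', 'café', 'cafe', 'té', 'infusión', 'especia', 'condimento',
--         'maíz seco', 'maiz seco', 'palomita', 'cereal')
--
-- # (days, search_in_name, keyword) — search_in_name True searches the name, False the category
-- _FLAT = tuple((180, True, k) for k in _DRY) + (
--     (60, True, 'congelado'), (60, False, 'congelad'), (60, False, 'frozen'),
--     (5, False, 'hoja'), (5, True, 'lechuga'), (5, True, 'espinaca'), (5, True, 'cilantro'),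
--     (5, False, 'proteína'), (5, False, 'proteina'), (5, False, 'carne'),
--     (5, False, 'pollo'), (5, False, 'pescado'), (5, False, 'mariscos'),
--     (7, False, 'fruta'),
--     (14, False, 'lácteo'), (14, False, 'lacteo'), (14, False, 'leche'),
--     (14, False, 'queso'), (14, False, 'yogurt'),
--     (21, False, 'tubérculo'), (21, False, 'tuberculo'), (21, True, 'papa'),
--     (21, True, 'batata'), (21, True, 'yuca'), (21, True, 'ñame'),
--     (10, False, 'vegetal'), (10, False, 'verdura'),
--     (21, True, 'huevo'),
--     (365, True, 'enlatado'), (365, False, 'enlatad'), (365, False, 'lata'),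
-- )
--
--
-- def _infer_shelf_life_days(name: str, category: str) -> int:
--     n = (name or "").lower()
--     c = (category or "").lower()
--     matched = [(i, days) for i, (days, in_name, kw) in enumerate(_FLAT)
--                if kw in (n if in_name else c)]
--     return min(matched, default=(0, 14))[1]
-- ===== Notes on version B (the rewrite author's own statement) =====
-- stated objective: alternative
-- what changed: Replaced A's early-return cascade of if-statements by a single flat keyword table scanned in full, collecting ALL matching (index, days) pairs and returning the minimum-index match (default 14), instead of stopping at the first matching rule.
import Mathlib
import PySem

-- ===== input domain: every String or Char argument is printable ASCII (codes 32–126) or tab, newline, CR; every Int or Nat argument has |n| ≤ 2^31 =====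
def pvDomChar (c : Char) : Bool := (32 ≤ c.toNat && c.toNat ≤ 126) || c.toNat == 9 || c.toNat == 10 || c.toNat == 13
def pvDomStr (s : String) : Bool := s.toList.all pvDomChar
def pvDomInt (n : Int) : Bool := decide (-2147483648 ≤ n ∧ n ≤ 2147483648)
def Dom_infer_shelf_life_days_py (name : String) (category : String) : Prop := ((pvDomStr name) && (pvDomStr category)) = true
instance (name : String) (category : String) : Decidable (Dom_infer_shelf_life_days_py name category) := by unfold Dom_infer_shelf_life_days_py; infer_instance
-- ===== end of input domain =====

-- B replaces A's early-return if-chain by a single scan of one flat keyword table that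
-- collects ALL matches and then selects the minimal-index one (objective: alternative, same cost).

-- ===== PORT A =====
def dryGoodsKeywords : List String :=
  ["arroz", "pasta", "fideo", "espagueti", "macarrón", "macarron",
   "lenteja", "habichuela", "frijol", "garbanzo", "gandul", "moro",
   "avena", "quinoa", "cuscús", "cuscus", "bulgur", "cebada",
   "harina", "azúcar", "azucar", "sal", "bicarbonato", "levadura",
   "cacao", "café", "cafe", "té", "infusión", "especia", "condimento",
   "maíz seco", "maiz seco", "palomita", "cereal"]

def infer_shelf_life_days_py (name : String) (category : String) : Int :=
  let name_lower := PySem.Str.lower name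
  let cat_lower := PySem.Str.lower category
  if dryGoodsKeywords.any (fun k => PySem.Str.isIn k name_lower) then 180
  else if PySem.Str.isIn "congelado" name_lower || PySem.Str.isIn "congelad" cat_lower || PySem.Str.isIn "frozen" cat_lower then 60
  else if PySem.Str.isIn "hoja" cat_lower || PySem.Str.isIn "lechuga" name_lower || PySem.Str.isIn "espinaca" name_lower || PySem.Str.isIn "cilantro" name_lower then 5
  else if PySem.Str.isIn "proteína" cat_lower || PySem.Str.isIn "proteina" cat_lower || PySem.Str.isIn "carne" cat_lower || PySem.Str.isIn "pollo" cat_lower || PySem.Str.isIn "pescado" cat_lower || PySem.Str.isIn "mariscos" cat_lower then 5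
  else if PySem.Str.isIn "fruta" cat_lower then 7
  else if PySem.Str.isIn "lácteo" cat_lower || PySem.Str.isIn "lacteo" cat_lower || PySem.Str.isIn "leche" cat_lower || PySem.Str.isIn "queso" cat_lower || PySem.Str.isIn "yogurt" cat_lower then 14
  else if PySem.Str.isIn "tubérculo" cat_lower || PySem.Str.isIn "tuberculo" cat_lower || PySem.Str.isIn "papa" name_lower || PySem.Str.isIn "batata" name_lower || PySem.Str.isIn "yuca" name_lower || PySem.Str.isIn "ñame" name_lower then 21
  else if PySem.Str.isIn "vegetal" cat_lower || PySem.Str.isIn "verdura" cat_lower then 10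
  else if PySem.Str.isIn "huevo" name_lower then 21
  else if PySem.Str.isIn "enlatado" name_lower || PySem.Str.isIn "enlatad" cat_lower || PySem.Str.isIn "lata" cat_lower then 365
  else 14

-- ===== PORT B =====
-- one flat table: (days, search_in_name, keyword), in Source B's order
def flatEntries : List (Int × Bool × String) :=
  (dryGoodsKeywords.map (fun k => (180, true, k))) ++
  [(60, true, "congelado"), (60, false, "congelad"), (60, false, "frozen"),
   (5, false, "hoja"), (5, true, "lechuga"), (5, true, "espinaca"), (5, true, "cilantro"),
   (5, false, "proteína"), (5, false, "proteina"), (5, false, "carne"),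
   (5, false, "pollo"), (5, false, "pescado"), (5, false, "mariscos"),
   (7, false, "fruta"),
   (14, false, "lácteo"), (14, false, "lacteo"), (14, false, "leche"),
   (14, false, "queso"), (14, false, "yogurt"),
   (21, false, "tubérculo"), (21, false, "tuberculo"), (21, true, "papa"),
   (21, true, "batata"), (21, true, "yuca"), (21, true, "ñame"),
   (10, false, "vegetal"), (10, false, "verdura"),
   (21, true, "huevo"),
   (365, true, "enlatado"), (365, false, "enlatad"), (365, false, "lata")]

-- Source B: matched = [(i, days) for enumerated matching entries]; min(matched, default=(0,14))[1].
-- Python's min on pairs is lexicographic keeping the first minimum; the indices i are pairwise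
-- distinct, so comparing first components only (as this fold does) is exact here.
def infer_shelf_life_days_py_alt (name : String) (category : String) : Int :=
  let n := PySem.Str.lower name
  let c := PySem.Str.lower category
  let matched : List (Nat × Int) :=
    flatEntries.zipIdx.filterMap (fun e =>
      if PySem.Str.isIn e.1.2.2 (if e.1.2.1 then n else c) then some (e.2, e.1.1) else none)
  match matched with
  | [] => 14
  | x :: xs => (xs.foldl (fun a b => if b.1 < a.1 then b else a) x).2

-- ===== PRECONDITION & SPEC =====
def Spec_infer_shelf_life_days_py (name : String) (category : String) (out : Int) : Prop := out = infer_shelf_life_days_py_alt name category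
instance (name : String) (category : String) (out : Int) : Decidable (Spec_infer_shelf_life_days_py name category out) := by unfold Spec_infer_shelf_life_days_py; infer_instance

-- ===== CLAIM =====
def Claim_equal_infer_shelf_life_days_py : Prop := ∀ (name : String) (category : String), Dom_infer_shelf_life_days_py name category → Spec_infer_shelf_life_days_py name category (infer_shelf_life_days_py name category)

-- ===== LEMMAS AND PROOFS =====

-- first-match reading of the flat table (proof-only intermediate form)
def fdays (es : List (Int × Bool × String)) (n c : String) : Int :=
  match es with
  | [] => 14
  | e :: t => if PySem.Str.isIn e.2.2 (if e.2.1 then n else c) then e.1 else fdays t n c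

lemma foldl_pick_fixed (l : List (Nat × Int)) (a : Nat × Int)
    (h : ∀ b ∈ l, ¬ b.1 < a.1) :
    l.foldl (fun a b => if b.1 < a.1 then b else a) a = a := by
  induction l with
  | nil => rfl
  | cons b t ih =>
    simp only [List.foldl_cons]
    rw [if_neg (h b (by simp))]
    exact ih (fun x hx => h x (by simp [hx]))

lemma idx_ge_of_mem_zipIdx {α : Type} (l : List α) (k : Nat) (p : α × Nat)
    (h : p ∈ l.zipIdx k) : k ≤ p.2 := by
  induction l generalizing k with
  | nil => simp [List.zipIdx] at h
  | cons x t ih =>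
    rw [List.zipIdx_cons] at h
    rcases List.mem_cons.mp h with h | h
    · simp [h]
    · exact Nat.le_of_succ_le (ih (k + 1) h)

lemma min_matched_eq_fdays (es : List (Int × Bool × String)) (k : Nat) (n c : String) :
    (match (es.zipIdx k).filterMap (fun e =>
        if PySem.Str.isIn e.1.2.2 (if e.1.2.1 then n else c) then some (e.2, e.1.1) else none) with
      | [] => (14 : Int)
      | x :: xs => (xs.foldl (fun a b => if b.1 < a.1 then b else a) x).2)
    = fdays es n c := by
  induction es generalizing k with
  | nil => simp [List.zipIdx, fdays]
  | cons e t ih =>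
    rw [List.zipIdx_cons]
    by_cases hm : PySem.Str.isIn e.2.2 (if e.2.1 then n else c) = true
    · simp only [List.filterMap_cons, hm, if_pos]
      have hfix : ∀ b ∈ (t.zipIdx (k + 1)).filterMap (fun e =>
          if PySem.Str.isIn e.1.2.2 (if e.1.2.1 then n else c) then some (e.2, e.1.1) else none),
          ¬ b.1 < ((⟨e, k⟩ : (Int × Bool × String) × Nat).2, e.1).1 := by
        intro b hb
        rcases List.mem_filterMap.mp hb with ⟨p, hp, hpb⟩
        by_cases hc : PySem.Str.isIn p.1.2.2 (if p.1.2.1 then n else c) = true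
        · rw [if_pos hc] at hpb
          have hk := idx_ge_of_mem_zipIdx t (k + 1) p hp
          cases hpb
          simp only
          omega
        · rw [if_neg hc] at hpb; cases hpb
      rw [foldl_pick_fixed _ _ hfix]
      simp only [fdays]
      rw [if_pos hm]
    · simp only [List.filterMap_cons, hm, if_neg, Bool.not_eq_true]
      rw [ih (k + 1)]
      simp only [fdays]
      rw [if_neg hm]

lemma sel_false (n c : String) : (if (false : Bool) = true then n else c) = c := rfl

lemma or_ite (a b : Bool) (x y : Int) :
    (if (a || b) then x else y) = (if a then x else if b then x else y) := by
  cases a <;> simp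

lemma fdays_dry_append (l : List String) (r : List (Int × Bool × String)) (n c : String) :
    fdays (l.map (fun k => (180, true, k)) ++ r) n c
    = if l.any (fun k => PySem.Str.isIn k n) then 180 else fdays r n c := by
  induction l with
  | nil => simp
  | cons k t ih =>
    simp only [List.map_cons, List.cons_append, fdays, List.any_cons, if_true,
      Bool.or_eq_true]
    by_cases h : PySem.Str.isIn k n = true
    · rw [if_pos h, if_pos (Or.inl h)]
    · rw [if_neg h, ih]
      by_cases h2 : (t.any fun k => PySem.Str.isIn k n) = true
      · rw [if_pos h2, if_pos (Or.inr h2)]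
      · rw [if_neg h2, if_neg (fun hor => hor.elim h h2)]

-- ===== VERDICT =====
theorem infer_shelf_life_days_py_spec : Claim_equal_infer_shelf_life_days_py := by
  intro name category _
  unfold Spec_infer_shelf_life_days_py infer_shelf_life_days_py infer_shelf_life_days_py_alt
  rw [min_matched_eq_fdays flatEntries 0 (PySem.Str.lower name) (PySem.Str.lower category)]
  unfold flatEntries
  rw [fdays_dry_append]
  simp only [fdays, or_ite, sel_false, if_true]
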